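-- pv_equiv track=rewrite | github.com/danimancilla/Diploma-Python-aplicado-a-la-Ciencia-de-Datos | Programación y Estructuras en Python/Clase 6/P1.py | mezclarListas
-- ===== SOURCE A (Python) =====
-- def mezclarListas(L1,L2):
--     largo1=len(L1)
--     largo2=len(L2)
--     minimo=min(largo1,largo2)
--     nueva_L=[]
--     i=0
--     while i<=minimo-1:
--         nueva_L.append(L1[i]+L2[i])
--         i += 1
--
--
--     if largo1>largo2:
--         while i<=largo1-1:
--             nueva_L.append(L1[i]+"_")
--             i += 1
--     elif largo2>largo1:
--         while i<=largo2-1: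
--             nueva_L.append("_"+L2[i])
--             i += 1
--     return nueva_L
-- ===== SOURCE B (Python) =====
-- def mezclarListas(L1, L2):
--     d = len(L1) - len(L2)
--     P1 = L1 + ["_"] * (-d)
--     P2 = L2 + ["_"] * d
--     return [a + b for a, b in zip(P1, P2)]
-- ===== Notes on version B (the rewrite author's own statement) =====
-- stated objective: idiomatic
-- what changed: Replaces A's common-prefix loop plus two branched tail loops with an index counter by a pad-then-zip pipeline: the shorter list is first padded with '_' to equal length, then the two equal-length lists are zipped and concatenated pairwise, with no indices or conditionals anywhere.
import Mathlib
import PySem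

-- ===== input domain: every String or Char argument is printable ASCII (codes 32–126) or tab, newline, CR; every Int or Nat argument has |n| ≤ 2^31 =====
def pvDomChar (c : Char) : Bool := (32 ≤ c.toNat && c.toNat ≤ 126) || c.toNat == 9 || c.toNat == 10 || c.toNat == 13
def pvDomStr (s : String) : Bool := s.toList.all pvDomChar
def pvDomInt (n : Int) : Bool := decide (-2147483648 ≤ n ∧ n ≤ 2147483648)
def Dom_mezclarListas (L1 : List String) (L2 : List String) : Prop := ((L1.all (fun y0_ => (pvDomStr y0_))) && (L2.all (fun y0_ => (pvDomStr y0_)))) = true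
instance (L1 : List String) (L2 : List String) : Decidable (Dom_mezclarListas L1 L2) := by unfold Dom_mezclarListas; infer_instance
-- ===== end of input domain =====

-- B replaces A's common-prefix loop plus two branched, index-carrying tail loops
-- by a pad-then-zip pipeline (pad the shorter list with "_", zip, concatenate pairs);
-- objective: idiomatic.

-- ===== PORT A =====
def mezclarListas (L1 : List String) (L2 : List String) : List String :=
  let largo1 : Int := L1.length
  let largo2 : Int := L2.length
  let minimo : Int := min largo1 largo2
  let nueva_L : List String := (PySem.List.pyRange 0 minimo 1).foldl
      (fun acc i => acc ++ [PySem.List.pyGetD L1 i "" ++ PySem.List.pyGetD L2 i ""]) []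
  if largo1 > largo2 then
    (PySem.List.pyRange minimo largo1 1).foldl
      (fun acc i => acc ++ [PySem.List.pyGetD L1 i "" ++ "_"]) nueva_L
  else if largo2 > largo1 then
    (PySem.List.pyRange minimo largo2 1).foldl
      (fun acc i => acc ++ ["_" ++ PySem.List.pyGetD L2 i ""]) nueva_L
  else nueva_L

-- ===== PORT B =====
-- pad the shorter list with "_" to equal length, zip, concatenate each pair
def mezclarListas_alt (L1 : List String) (L2 : List String) : List String :=
  let d : Int := (L1.length : Int) - (L2.length : Int)
  let P1 : List String := L1 ++ List.replicate (-d).toNat "_"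
  let P2 : List String := L2 ++ List.replicate d.toNat "_"
  (P1.zip P2).map (fun p => p.1 ++ p.2)

-- ===== PRECONDITION & SPEC =====
def Spec_mezclarListas (L1 : List String) (L2 : List String) (out : List String) : Prop := out = mezclarListas_alt L1 L2
instance (L1 : List String) (L2 : List String) (out : List String) : Decidable (Spec_mezclarListas L1 L2 out) := by unfold Spec_mezclarListas; infer_instance

-- ===== CLAIM (what is proved, stated in full; the proofs are below) =====
def Claim_equal_mezclarListas : Prop := ∀ (L1 : List String) (L2 : List String), Dom_mezclarListas L1 L2 → Spec_mezclarListas L1 L2 (mezclarListas L1 L2)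

-- ===== LEMMAS AND PROOFS =====

-- A's value in closed form: zipped common prefix, then the one nonempty tail.
lemma mezclarListas_eq_norm (L1 L2 : List String) :
    mezclarListas L1 L2 =
      (List.range (min L1.length L2.length)).map
        (fun k => L1.getD k "" ++ L2.getD k "")
      ++ (List.range (L1.length - L2.length)).map
        (fun k => L1.getD (L2.length + k) "" ++ "_")
      ++ (List.range (L2.length - L1.length)).map
        (fun k => "_" ++ L2.getD (L1.length + k) "") := by
  unfold mezclarListas
  simp only [PySem.List.pyRange_one, List.foldl_map,
    PySem.List.foldl_append_singleton_eq_map, List.nil_append]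
  have hmin : ((min (L1.length : Int) (L2.length : Int)) - 0).toNat = min L1.length L2.length := by omega
  rw [hmin]
  rcases lt_trichotomy L1.length L2.length with h | h | h
  · rw [if_neg (by omega), if_pos (by omega)]
    have e1 : L1.length - L2.length = 0 := by omega
    have e2 : ((L2.length : Int) - min (L1.length : Int) (L2.length : Int)).toNat
        = L2.length - L1.length := by omega
    rw [e1, e2]
    simp only [List.range_zero, List.map_nil, List.append_nil]
    congr 1
    · apply List.map_congr_left; intro k _; simp [PySem.List.pyGetD_natCast]
    · apply List.map_congr_left; intro k hk
      simp only [List.mem_range] at hk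
      have : min (L1.length : Int) (L2.length : Int) + (k : Int) = ((L1.length + k : Nat) : Int) := by omega
      rw [this, PySem.List.pyGetD_natCast]
  · rw [if_neg (by omega), if_neg (by omega)]
    have e1 : L1.length - L2.length = 0 := by omega
    have e2 : L2.length - L1.length = 0 := by omega
    rw [e1, e2]
    simp only [List.range_zero, List.map_nil, List.append_nil]
    apply List.map_congr_left; intro k _; simp [PySem.List.pyGetD_natCast]
  · rw [if_pos (by omega)]
    have e1 : L2.length - L1.length = 0 := by omega
    have e2 : ((L1.length : Int) - min (L1.length : Int) (L2.length : Int)).toNat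
        = L1.length - L2.length := by omega
    rw [e1, e2]
    simp only [List.range_zero, List.map_nil, List.append_nil]
    congr 1
    · apply List.map_congr_left; intro k _; simp [PySem.List.pyGetD_natCast]
    · apply List.map_congr_left; intro k hk
      simp only [List.mem_range] at hk
      have : min (L1.length : Int) (L2.length : Int) + (k : Int) = ((L2.length + k : Nat) : Int) := by omega
      rw [this, PySem.List.pyGetD_natCast]

-- B's value in closed form: one padded map over range(max).
lemma mezclarListas_alt_eq_norm (L1 L2 : List String) :
    mezclarListas_alt L1 L2 =
      (List.range (max L1.length L2.length)).map
        (fun k => (if k < L1.length then L1.getD k "" else "_") ++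
                  (if k < L2.length then L2.getD k "" else "_")) := by
  unfold mezclarListas_alt
  apply List.ext_getElem
  · simp only [List.length_map, List.length_zip, List.length_append,
      List.length_replicate, List.length_range]
    omega
  · intro i h1 h2
    simp only [List.length_map, List.length_zip, List.length_append,
      List.length_replicate] at h1
    simp only [List.getElem_map, List.getElem_zip, List.getElem_range]
    simp only [List.getElem_append, List.getElem_replicate]
    split_ifs with ha hb hb
    all_goals first
      | omega
      | (congr 1 <;> simp [List.getD_eq_getElem?_getD, List.getElem?_eq_getElem, *])

-- ===== VERDICT (by name: the statement is the Claim_ definition above) =====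
theorem mezclarListas_spec : Claim_equal_mezclarListas := by
  intro L1 L2 _
  unfold Spec_mezclarListas
  rw [mezclarListas_eq_norm, mezclarListas_alt_eq_norm]
  apply List.ext_getElem
  · simp only [List.length_append, List.length_map, List.length_range]; omega
  · intro i h1 h2
    simp only [List.length_append, List.length_map, List.length_range] at h1 h2
    simp only [List.getElem_append, List.getElem_map, List.getElem_range,
      List.length_append, List.length_map, List.length_range]
    split_ifs <;> first
      | rfl
      | omega
      | (congr 2 <;> omega)
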